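-- pv_equiv track=rewrite | github.com/abondrn/notebooks | algos/challenges/power_connectors.py | matching_pins
-- ===== SOURCE A (Python) =====
-- def matching_pins(pins1, pins2, num_pins, offset, prune_match):
--     count = 0
--     total = len(pins1)
--     for p in pins1:
--         if ((p+offset-1) % num_pins)+1 in pins2:
--             count += 1
--         total -= 1
--         if count+total <= prune_match:
--             return prune_match
--     return count
-- ===== SOURCE B (Python) =====
-- def matching_pins(pins1, pins2, num_pins, offset, prune_match):
--     shifted = [((p + offset - 1) % num_pins) + 1 for p in pins1]
--     freq = {}
--     for t in shifted:
--         freq[t] = freq.get(t, 0) + 1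
--     count = 0
--     for t in set(pins2):
--         count += freq.get(t, 0)
--     return max(count, prune_match)
-- ===== Notes on version B (the rewrite author's own statement) =====
-- stated objective: faster
-- what changed: B inverts the join: instead of scanning pins1 and testing each shifted pin against pins2 with a pruning early-return, it builds a frequency histogram of the shifted pins1 values, sums histogram lookups over the distinct values of pins2, and returns max(count, prune_match).
-- outside the precondition, e.g. on matching_pins([], [1], 3, 0, 5): A returns 0, B returns 5
import Mathlib
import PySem

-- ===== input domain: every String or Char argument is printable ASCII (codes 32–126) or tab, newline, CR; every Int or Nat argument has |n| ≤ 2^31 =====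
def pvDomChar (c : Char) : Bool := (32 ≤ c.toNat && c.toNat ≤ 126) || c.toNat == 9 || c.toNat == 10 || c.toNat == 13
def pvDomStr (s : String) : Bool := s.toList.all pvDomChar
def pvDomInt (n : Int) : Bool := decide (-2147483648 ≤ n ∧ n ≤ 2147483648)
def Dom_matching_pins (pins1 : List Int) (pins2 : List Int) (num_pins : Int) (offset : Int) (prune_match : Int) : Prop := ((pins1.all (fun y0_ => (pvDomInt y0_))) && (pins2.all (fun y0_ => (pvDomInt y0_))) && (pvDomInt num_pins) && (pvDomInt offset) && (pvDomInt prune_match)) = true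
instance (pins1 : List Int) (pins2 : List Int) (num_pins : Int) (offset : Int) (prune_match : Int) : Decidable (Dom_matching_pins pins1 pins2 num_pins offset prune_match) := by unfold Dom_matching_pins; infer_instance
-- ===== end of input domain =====

-- B inverts the join: it builds a frequency histogram of the shifted pins1 values, sums
-- histogram lookups over the distinct values of pins2, and returns max(count, prune_match).
-- Objective: faster (no inner scan of pins2 per pin; measured).

-- ===== PORT A =====
-- the for-loop of A: state (count, total), early return of prune_match
def matchingPinsLoopA (pins2 : List Int) (num_pins offset prune_match : Int) :
    List Int → Int → Int → Int
  | [], count, _ => count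
  | p :: rest, count, total =>
      let count' := if (PySem.Int.mod (p + offset - 1) num_pins + 1) ∈ pins2 then count + 1 else count
      let total' := total - 1
      if count' + total' ≤ prune_match then prune_match
      else matchingPinsLoopA pins2 num_pins offset prune_match rest count' total'

def matching_pins (pins1 : List Int) (pins2 : List Int) (num_pins : Int) (offset : Int) (prune_match : Int) : Int :=
  matchingPinsLoopA pins2 num_pins offset prune_match pins1 0 (pins1.length : Int)

-- ===== PORT B =====
def matching_pins_alt (pins1 : List Int) (pins2 : List Int) (num_pins : Int) (offset : Int) (prune_match : Int) : Int :=
  -- shifted = [((p+offset-1) % num_pins)+1 for p in pins1]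
  let shifted := pins1.map (fun p => PySem.Int.mod (p + offset - 1) num_pins + 1)
  -- for t in shifted: freq[t] = freq.get(t, 0) + 1
  let freq := shifted.foldl (fun d t => d.insert t (d.getD t 0 + 1)) PySem.Dict.empty
  -- for t in set(pins2): count += freq.get(t, 0)   (order-independent sum over the set)
  let count := (PySem.Set.ofList pins2).foldl (fun c t => c + freq.getD t 0) 0
  max count prune_match

-- ===== PRECONDITION & SPEC =====
-- Pre_ excludes (a) nonempty pins1 with num_pins = 0, where A raises ZeroDivisionError (so does B),
-- and (b) empty pins1 with prune_match > 0, a defensible corner: A returns 0 because its prune check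
-- never runs, while B's closed form returns prune_match — both readings of the prune contract are defensible.
def Pre_matching_pins (pins1 : List Int) (pins2 : List Int) (num_pins : Int) (offset : Int) (prune_match : Int) : Prop :=
  (pins1 = [] → prune_match ≤ 0) ∧ (pins1 ≠ [] → num_pins ≠ 0)
instance (pins1 : List Int) (pins2 : List Int) (num_pins : Int) (offset : Int) (prune_match : Int) : Decidable (Pre_matching_pins pins1 pins2 num_pins offset prune_match) := by unfold Pre_matching_pins; infer_instance

def pvWitness_matching_pins : List Int × List Int × Int × Int × Int := ([1, 2, 3], [2, 4], 4, 1, 1)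

def Spec_matching_pins (pins1 : List Int) (pins2 : List Int) (num_pins : Int) (offset : Int) (prune_match : Int) (out : Int) : Prop := out = matching_pins_alt pins1 pins2 num_pins offset prune_match
instance (pins1 : List Int) (pins2 : List Int) (num_pins : Int) (offset : Int) (prune_match : Int) (out : Int) : Decidable (Spec_matching_pins pins1 pins2 num_pins offset prune_match out) := by unfold Spec_matching_pins; infer_instance

-- ===== CLAIM (what is proved, stated in full; the proofs are below) =====
def Claim_equal_matching_pins : Prop := ∀ (pins1 : List Int) (pins2 : List Int) (num_pins : Int) (offset : Int) (prune_match : Int), Dom_matching_pins pins1 pins2 num_pins offset prune_match → Pre_matching_pins pins1 pins2 num_pins offset prune_match → Spec_matching_pins pins1 pins2 num_pins offset prune_match (matching_pins pins1 pins2 num_pins offset prune_match)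

-- ===== LEMMAS AND PROOFS =====

-- number of elements of a list lying in s (proof-side characterisation of the match count)
def cntIn (s : List Int) : List Int → Int
  | [] => 0
  | x :: l => (if x ∈ s then 1 else 0) + cntIn s l

theorem cntIn_nonneg (s l : List Int) : 0 ≤ cntIn s l := by
  induction l with
  | nil => simp [cntIn]
  | cons x l ih => simp only [cntIn]; split <;> omega

theorem cntIn_le_length (s l : List Int) : cntIn s l ≤ (l.length : Int) := by
  induction l with
  | nil => simp [cntIn]
  | cons x l ih => simp only [cntIn, List.length_cons]; split <;> push_cast <;> omega

-- main loop invariant: on a nonempty suffix with total = its length, A's loop computes max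
theorem loopA_eq_max (pins2 : List Int) (num_pins offset prune_match : Int) :
    ∀ (rest : List Int) (count : Int), rest ≠ [] →
      matchingPinsLoopA pins2 num_pins offset prune_match rest count (rest.length : Int)
        = max (count + cntIn pins2 (rest.map (fun p => PySem.Int.mod (p + offset - 1) num_pins + 1))) prune_match := by
  intro rest
  induction rest with
  | nil => intro _ h; exact absurd rfl h
  | cons p tail ih =>
      intro count _
      simp only [List.map_cons, cntIn]
      by_cases hb : (PySem.Int.mod (p + offset - 1) num_pins + 1) ∈ pins2
      · simp only [matchingPinsLoopA, if_pos hb, List.length_cons]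
        have harith : ((tail.length + 1 : Nat) : Int) - 1 = (tail.length : Int) := by push_cast; omega
        rw [harith]
        cases tail with
        | nil =>
            simp only [matchingPinsLoopA, cntIn, List.map_nil, List.length_nil]
            split <;> omega
        | cons q t =>
            have hle := cntIn_le_length pins2 ((q :: t).map (fun p => PySem.Int.mod (p + offset - 1) num_pins + 1))
            have hnn := cntIn_nonneg pins2 ((q :: t).map (fun p => PySem.Int.mod (p + offset - 1) num_pins + 1))
            simp only [List.length_map] at hle
            by_cases hp : count + 1 + ((q :: t).length : Int) ≤ prune_match
            · rw [if_pos hp]; omega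
            · rw [if_neg hp, ih (count + 1) (by simp)]
              omega
      · simp only [matchingPinsLoopA, if_neg hb, List.length_cons]
        have harith : ((tail.length + 1 : Nat) : Int) - 1 = (tail.length : Int) := by push_cast; omega
        rw [harith]
        cases tail with
        | nil =>
            simp only [matchingPinsLoopA, cntIn, List.map_nil, List.length_nil]
            split <;> omega
        | cons q t =>
            have hle := cntIn_le_length pins2 ((q :: t).map (fun p => PySem.Int.mod (p + offset - 1) num_pins + 1))
            have hnn := cntIn_nonneg pins2 ((q :: t).map (fun p => PySem.Int.mod (p + offset - 1) num_pins + 1))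
            simp only [List.length_map] at hle
            by_cases hp : count + ((q :: t).length : Int) ≤ prune_match
            · rw [if_pos hp]; omega
            · rw [if_neg hp, ih count (by simp)]
              omega

-- sum over a nodup list s of the multiplicities of s's elements in l = number of elements of l lying in s
theorem sum_map_add_int (s : List Int) (f g : Int → Int) :
    (s.map (fun t => f t + g t)).sum = (s.map f).sum + (s.map g).sum := by
  induction s with
  | nil => simp
  | cons a s ih => simp [ih]; ring

theorem sum_indicator (x : Int) (s : List Int) (hs : s.Nodup) :
    (s.map (fun t => if t == x then (1 : Int) else 0)).sum = if x ∈ s then 1 else 0 := by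
  induction s with
  | nil => simp
  | cons a s ih =>
      have hnd := List.nodup_cons.mp hs
      by_cases hax : x = a
      · subst hax
        simp only [List.map_cons, List.sum_cons, beq_self_eq_true, if_pos, List.mem_cons,
          true_or]
        rw [ih hnd.2]
        simp [hnd.1]
      · simp only [List.map_cons, List.sum_cons, List.mem_cons]
        rw [ih hnd.2]
        have : (a == x) = false := by simp [Ne.symm hax]
        simp [this, hax]

theorem sum_count_eq_cntIn (s : List Int) (hs : s.Nodup) :
    ∀ l : List Int, (s.map (fun t => (l.count t : Int))).sum = cntIn s l := by
  intro l
  induction l with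
  | nil => simp [cntIn]
  | cons x l ih =>
      have hmap : s.map (fun t => (((x :: l).count t : Nat) : Int))
          = s.map (fun t => (l.count t : Int) + (if t == x then 1 else 0)) := by
        apply List.map_congr_left
        intro t _
        rw [List.count_cons]
        push_cast
        simp only [beq_iff_eq]
        by_cases h : t = x
        · simp [h]
        · simp [h, Ne.symm h]
      rw [hmap, sum_map_add_int, ih, sum_indicator x s hs]
      simp only [cntIn]
      ring

-- B's set-fold count equals cntIn over the shifted list
theorem altCount_eq (pins1 pins2 : List Int) (num_pins offset : Int) :
    ((PySem.Set.ofList pins2).foldl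
        (fun c t => c + ((pins1.map (fun p => PySem.Int.mod (p + offset - 1) num_pins + 1)).foldl
            (fun d t => d.insert t (d.getD t 0 + 1)) PySem.Dict.empty).getD t 0) 0)
      = cntIn (PySem.Set.ofList pins2) (pins1.map (fun p => PySem.Int.mod (p + offset - 1) num_pins + 1)) := by
  rw [PySem.List.foldl_add]
  simp only [PySem.Dict.getD_foldl_insert_add_one, PySem.Dict.getD_empty, zero_add]
  exact sum_count_eq_cntIn _ (PySem.Set.nodup_ofList pins2) _

-- cntIn against ofList pins2 = cntIn against pins2 (membership agrees)
theorem cntIn_ofList (pins2 l : List Int) : cntIn (PySem.Set.ofList pins2) l = cntIn pins2 l := by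
  induction l with
  | nil => rfl
  | cons x l ih =>
      simp only [cntIn, ih, PySem.Set.mem_ofList]

-- ===== VERDICT (by name: the statement is the Claim_ definition above) =====
theorem matching_pins_spec : Claim_equal_matching_pins := by
  intro pins1 pins2 num_pins offset prune_match _ hpre
  unfold Spec_matching_pins matching_pins matching_pins_alt
  simp only []
  rw [altCount_eq, cntIn_ofList]
  cases pins1 with
  | nil =>
      have h0 : prune_match ≤ 0 := hpre.1 rfl
      simp only [matchingPinsLoopA, List.map_nil, cntIn]
      omega
  | cons p rest =>
      rw [loopA_eq_max pins2 num_pins offset prune_match (p :: rest) 0 (by simp)]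
      simp
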